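-- pv_equiv track=rewrite | github.com/denetii/io_thps_scene | helpers.py | swizzle
-- ===== SOURCE A (Python) =====
-- def swizzle_axis(val, mask):
--     bit = 1
--     result = 0
--     while bit <= mask:
--         test = mask & bit
--         if test != 0: result |= val & bit
--         else: val <<= 1
--         bit <<= 1
--     return result
--
-- def swizzle(data, width, height, bitCount, depth, unswizzle):
--     def aux(x, y, z, masks):
--         return (swizzle_axis(x, masks.x) |
--                 swizzle_axis(y, masks.y) |
--                 (0 if z == -1 else swizzle_axis(z, masks.z)))
--
--     bitCount //= 8
--     a = 0
--     b = 0
--     outdata = [0] * len(data)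
--     offset = 0
--     masks = MaskSet(width, height, depth)
--     for y in range(height):
--         for x in range(width):
--             a = (y * width + x) * bitCount
--             b = aux(x, y, -1, masks) * bitCount
--             if not unswizzle:
--                 a, b = b, a
--             for i in range(offset, bitCount + offset):
--                 outdata[a + i] = data[b + i]
--     return outdata
--
-- class MaskSet:
--     def __init__(self, width, height, depth):
--         self.x = 0
--         self.y = 0
--         self.z = 0
--         bit = 1
--         index = 1
--         while bit < width or bit < height or bit < depth:
--             if bit < width:
--                 self.x |= index
--                 index <<= 1
--             if bit < height:
--                 self.y |= index
--                 index <<= 1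
--             if bit < depth:
--                 self.z |= index
--                 index <<= 1
--             bit <<= 1
-- ===== SOURCE B (Python) =====
-- def _masks(width, height, depth):
--     # same bit-interleaving mask layout as MaskSet, but only x/y masks are kept
--     mask_x = 0
--     mask_y = 0
--     bit = 1
--     index = 1
--     while bit < width or bit < height or bit < depth:
--         if bit < width:
--             mask_x |= index
--             index <<= 1
--         if bit < height:
--             mask_y |= index
--             index <<= 1
--         if bit < depth:
--             index <<= 1
--         bit <<= 1
--     return mask_x, mask_y
--
-- def swizzle(data, width, height, bitCount, depth, unswizzle):
--     bc = bitCount // 8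
--     mask_x, mask_y = _masks(width, height, depth)
--     out = [0] * len(data)
--     a = 0
--     sy = 0
--     for y in range(height):
--         sx = 0
--         for x in range(width):
--             b = (sx | sy) * bc
--             if unswizzle:
--                 for i in range(bc):
--                     out[a + i] = data[b + i]
--             else:
--                 for i in range(bc):
--                     out[b + i] = data[a + i]
--             a += bc
--             sx = (sx - mask_x) & mask_x
--         sy = (sy - mask_y) & mask_y
--     return out
-- ===== Notes on version B (the rewrite author's own statement) =====
-- stated objective: faster
-- what changed: Replaces the two per-pixel swizzle_axis bit-loops by O(1) incremental Morton counters (sx = (sx - mask_x) & mask_x per pixel, sy = (sy - mask_y) & mask_y per row) and an accumulating linear offset; intended as faster (per-pixel cost drops from O(bits) to O(1)).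
import Mathlib
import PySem

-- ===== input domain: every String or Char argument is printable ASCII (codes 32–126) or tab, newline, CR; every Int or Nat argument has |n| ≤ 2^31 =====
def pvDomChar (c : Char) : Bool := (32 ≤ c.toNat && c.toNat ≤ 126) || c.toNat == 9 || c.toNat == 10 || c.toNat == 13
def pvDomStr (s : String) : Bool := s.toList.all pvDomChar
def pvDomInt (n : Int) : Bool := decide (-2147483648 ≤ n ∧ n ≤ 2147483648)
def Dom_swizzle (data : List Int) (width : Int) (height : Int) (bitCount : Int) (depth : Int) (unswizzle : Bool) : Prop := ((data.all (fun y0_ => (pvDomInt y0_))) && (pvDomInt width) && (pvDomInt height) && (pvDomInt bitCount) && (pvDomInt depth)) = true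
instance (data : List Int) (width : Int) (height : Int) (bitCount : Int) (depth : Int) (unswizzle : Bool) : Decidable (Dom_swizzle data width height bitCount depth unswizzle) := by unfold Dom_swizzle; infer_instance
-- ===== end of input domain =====

-- B replaces the per-pixel per-bit swizzle_axis loops by O(1) incremental masked-counter
-- updates (sx = (sx - mask_x) & mask_x), intended as faster (O(1) instead of O(bits) per pixel).
-- Return value only — neither program mutates its input.

-- ===== PORT A =====
-- swizzle_axis: 'while bit <= mask' with bit doubling from 1; fuel 256 is spare headroom:
-- under Dom the masks produced by MaskSet are < 2^192, so the loop test fails within 193 rounds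
def axLoop (fuel : Nat) (bit val result mask : Int) : Int :=
  match fuel with
  | 0 => result
  | f+1 =>
      if bit ≤ mask then
        (if PySem.Int.band mask bit ≠ 0 then
           axLoop f (bit <<< (1:Nat)) val (PySem.Int.bor result (PySem.Int.band val bit)) mask
         else axLoop f (bit <<< (1:Nat)) (val <<< (1:Nat)) result mask)
      else result

def swizzleAxis (val mask : Int) : Int := axLoop 256 1 val 0 mask

-- MaskSet.__init__: 'while bit < width or bit < height or bit < depth' with bit doubling from 1;
-- fuel 64 is spare headroom: under Dom the dimensions are ≤ 2^31, so the test fails within 32 rounds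
def maskLoop (fuel : Nat) (bit index mx my mz width height depth : Int) : Int × Int × Int :=
  match fuel with
  | 0 => (mx, my, mz)
  | f+1 =>
      if bit < width ∨ bit < height ∨ bit < depth then
        let p1 := if bit < width then (PySem.Int.bor mx index, index <<< (1:Nat)) else (mx, index)
        let p2 := if bit < height then (PySem.Int.bor my p1.2, p1.2 <<< (1:Nat)) else (my, p1.2)
        let p3 := if bit < depth then (PySem.Int.bor mz p2.2, p2.2 <<< (1:Nat)) else (mz, p2.2)
        maskLoop f (bit <<< (1:Nat)) p3.2 p1.1 p2.1 p3.1 width height depth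
      else (mx, my, mz)

def maskSet (width height depth : Int) : Int × Int × Int :=
  maskLoop 64 1 1 0 0 0 width height depth

def swizzle (data : List Int) (width : Int) (height : Int) (bitCount : Int) (depth : Int) (unswizzle : Bool) : List Int :=
  let bc := PySem.Int.floordiv bitCount 8
  let outdata : List Int := List.replicate data.length 0
  let masks := maskSet width height depth
  -- offset is 0 throughout; aux(x, y, -1, masks) = swizzle_axis(x,mask_x) | swizzle_axis(y,mask_y) | 0
  (PySem.List.pyRange 0 height 1).foldl (fun outdata y =>
    (PySem.List.pyRange 0 width 1).foldl (fun outdata x =>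
      let a := (y * width + x) * bc
      let b := PySem.Int.bor (PySem.Int.bor (swizzleAxis x masks.1) (swizzleAxis y masks.2.1)) 0 * bc
      let p := if !unswizzle then (b, a) else (a, b)
      (PySem.List.pyRange 0 bc 1).foldl (fun outdata i =>
        PySem.List.pySetD outdata (p.1 + i) (PySem.List.pyGetD data (p.2 + i) 0)) outdata)
      outdata) outdata

-- ===== PORT B =====
-- _masks: same interleaving loop as MaskSet but only the x/y masks are kept
def masksAltLoop (fuel : Nat) (bit index mx my width height depth : Int) : Int × Int :=
  match fuel with
  | 0 => (mx, my)
  | f+1 =>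
      if bit < width ∨ bit < height ∨ bit < depth then
        let p1 := if bit < width then (PySem.Int.bor mx index, index <<< (1:Nat)) else (mx, index)
        let p2 := if bit < height then (PySem.Int.bor my p1.2, p1.2 <<< (1:Nat)) else (my, p1.2)
        let i3 := if bit < depth then p2.2 <<< (1:Nat) else p2.2
        masksAltLoop f (bit <<< (1:Nat)) i3 p1.1 p2.1 width height depth
      else (mx, my)

def masksAlt (width height depth : Int) : Int × Int :=
  masksAltLoop 64 1 1 0 0 width height depth

def swizzle_alt (data : List Int) (width : Int) (height : Int) (bitCount : Int) (depth : Int) (unswizzle : Bool) : List Int :=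
  let bc := PySem.Int.floordiv bitCount 8
  let m := masksAlt width height depth
  let r := (PySem.List.pyRange 0 height 1).foldl
    (fun (s : List Int × Int × Int) _y =>
      let t := (PySem.List.pyRange 0 width 1).foldl
        (fun (t : List Int × Int × Int) _x =>
          let b := PySem.Int.bor t.2.2 s.2.2 * bc
          let out := if unswizzle then
              (PySem.List.pyRange 0 bc 1).foldl (fun o i => PySem.List.pySetD o (t.2.1 + i) (PySem.List.pyGetD data (b + i) 0)) t.1
            else
              (PySem.List.pyRange 0 bc 1).foldl (fun o i => PySem.List.pySetD o (b + i) (PySem.List.pyGetD data (t.2.1 + i) 0)) t.1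
          (out, t.2.1 + bc, PySem.Int.band (t.2.2 - m.1) m.1))
        (s.1, s.2.1, 0)
      (t.1, t.2.1, PySem.Int.band (s.2.2 - m.2) m.2))
    (List.replicate data.length 0, 0, 0)
  r.1

-- ===== PRECONDITION & SPEC =====
-- mortonAddr x y w h d: the bit-interleaved (Morton) address of pixel (x,y) for dimensions
-- w,h,d, written as direct recursion on the binary digits of the coordinates: each level
-- consumes one low bit per still-open dimension, in the order x, y, z (z's bit is skipped
-- since z is always 0 here, but it still occupies an index position).  The first argument
-- is structural fuel; w+h+d strictly bounds the recursion depth, so it never runs out.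
def mortonGo : Nat → Nat → Nat → Nat → Nat → Nat → Nat
  | 0, _, _, _, _, _ => 0
  | f+1, x, y, w, h, d =>
      if w ≤ 1 ∧ h ≤ 1 ∧ d ≤ 1 then 0
      else
        let bits := (if 1 < w then 1 else 0) + (if 1 < h then 1 else 0) + (if 1 < d then 1 else 0)
        (if 1 < w then x % 2 else 0) +
        (if 1 < h then (if 1 < w then 2 else 1) * (y % 2) else 0) +
        2 ^ bits * mortonGo f (x / 2) (y / 2) ((w + 1) / 2) ((h + 1) / 2) ((d + 1) / 2)

def mortonAddr (x y w h d : Nat) : Nat := mortonGo (w + h + d) x y w h d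

-- Pre_ excludes exactly the inputs on which Python A raises IndexError: whenever the copy
-- loops run at all (positive dims, bitCount // 8 > 0), data must be long enough for both the
-- largest linear address (width*height*bc) and the largest bit-interleaved address, which is
-- (mortonAddr (width-1) (height-1) … + 1) * bc; on every other input A returns normally.
def Pre_swizzle (data : List Int) (width : Int) (height : Int) (bitCount : Int) (depth : Int) (unswizzle : Bool) : Prop :=
  0 < width → 0 < height → 0 < PySem.Int.floordiv bitCount 8 →
    (width * height * PySem.Int.floordiv bitCount 8 ≤ (data.length : Int) ∧
     ((mortonAddr (width.toNat - 1) (height.toNat - 1) width.toNat height.toNat depth.toNat + 1 : Nat) : Int)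
        * PySem.Int.floordiv bitCount 8 ≤ (data.length : Int))
instance (data : List Int) (width : Int) (height : Int) (bitCount : Int) (depth : Int) (unswizzle : Bool) : Decidable (Pre_swizzle data width height bitCount depth unswizzle) := by unfold Pre_swizzle; infer_instance

def pvWitness_swizzle : List Int × Int × Int × Int × Int × Bool := ([10, 20, 30, 40], 2, 2, 8, 1, true)

def Spec_swizzle (data : List Int) (width : Int) (height : Int) (bitCount : Int) (depth : Int) (unswizzle : Bool) (out : List Int) : Prop := out = swizzle_alt data width height bitCount depth unswizzle
instance (data : List Int) (width : Int) (height : Int) (bitCount : Int) (depth : Int) (unswizzle : Bool) (out : List Int) : Decidable (Spec_swizzle data width height bitCount depth unswizzle out) := by unfold Spec_swizzle; infer_instance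

-- ===== CLAIM (what is proved, stated in full; the proofs are below) =====
def Claim_equal_swizzle : Prop := ∀ (data : List Int) (width : Int) (height : Int) (bitCount : Int) (depth : Int) (unswizzle : Bool), Dom_swizzle data width height bitCount depth unswizzle → Pre_swizzle data width height bitCount depth unswizzle → Spec_swizzle data width height bitCount depth unswizzle (swizzle data width height bitCount depth unswizzle)

-- ===== LEMMAS AND PROOFS =====
theorem land_parity (r r' : Nat) (hr : r < 2) (hr' : r' < 2) (a b : Nat) :
    (2*a+r) &&& (2*b+r') = 2*(a &&& b) + (r * r') := by
  apply Nat.eq_of_testBit_eq; intro i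
  have h1 : (2*a+r)/2 = a := by omega
  have h2 : (2*b+r')/2 = b := by omega
  have h3 : (2*(a &&& b) + r*r')/2 = a &&& b := by interval_cases r <;> interval_cases r' <;> omega
  simp only [Nat.testBit_and]
  cases i with
  | zero =>
    simp only [Nat.testBit_zero]
    interval_cases r <;> interval_cases r' <;> simp
  | succ n =>
    simp only [Nat.testBit_succ, h1, h2, h3, Nat.testBit_and]

theorem lor_parity (r r' : Nat) (hr : r < 2) (hr' : r' < 2) (a b : Nat) :
    (2*a+r) ||| (2*b+r') = 2*(a ||| b) + (r + r' - r * r') := by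
  apply Nat.eq_of_testBit_eq; intro i
  have h1 : (2*a+r)/2 = a := by omega
  have h2 : (2*b+r')/2 = b := by omega
  have h3 : (2*(a ||| b) + (r + r' - r*r'))/2 = a ||| b := by interval_cases r <;> interval_cases r' <;> omega
  simp only [Nat.testBit_or]
  cases i with
  | zero =>
    simp only [Nat.testBit_zero]
    interval_cases r <;> interval_cases r' <;> simp
  | succ n =>
    simp only [Nat.testBit_succ, h1, h2, h3, Nat.testBit_or]

theorem lor_pow_eq_add (k : Nat) : ∀ (a b : Nat), a < 2^k → a ||| 2^k * b = a + 2^k * b := by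
  induction k with
  | zero => intro a b h; interval_cases a; simp [Nat.one_mul]
  | succ k ih =>
    intro a b h
    have := lor_parity (a % 2) 0 (Nat.mod_lt _ (by norm_num)) (by norm_num) (a/2) (2^k*b)
    have ha : 2*(a/2) + a%2 = a := by omega
    rw [ha] at this
    have hb : 2*(2^k*b) + 0 = 2^(k+1)*b := by ring
    rw [hb] at this
    rw [this, ih (a/2) b (by omega)]
    ring_nf
    omega

def popN (m : Nat) : Nat :=
  if m = 0 then 0 else m % 2 + popN (m / 2)
decreasing_by omega

def spreadN (n m : Nat) : Nat :=
  if m = 0 then 0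
  else if m % 2 = 1 then n % 2 + 2 * spreadN (n / 2) (m / 2)
  else 2 * spreadN n (m / 2)
decreasing_by all_goals omega


theorem popN_zero : popN 0 = 0 := by rw [popN]; simp
theorem popN_odd (m : Nat) : popN (2*m+1) = popN m + 1 := by
  rw [popN, if_neg (by omega : ¬(2*m+1 = 0)), (by omega : (2*m+1)%2 = 1), (by omega : (2*m+1)/2 = m)]
  omega
theorem popN_even (m : Nat) (h : m ≠ 0) : popN (2*m) = popN m := by
  rw [popN, if_neg (by omega : ¬(2*m = 0)), (by omega : (2*m)%2 = 0), (by omega : (2*m)/2 = m)]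
  omega

theorem spreadN_mask_zero (n : Nat) : spreadN n 0 = 0 := by rw [spreadN]; simp
theorem spreadN_odd (n m : Nat) : spreadN n (2*m+1) = n % 2 + 2 * spreadN (n/2) m := by
  rw [spreadN, if_neg (by omega : ¬(2*m+1 = 0)), (by omega : (2*m+1)%2 = 1),
      (by omega : (2*m+1)/2 = m)]
  simp
theorem spreadN_even (n m : Nat) (h : m ≠ 0) : spreadN n (2*m) = 2 * spreadN n m := by
  rw [spreadN, if_neg (by omega : ¬(2*m = 0)), (by omega : (2*m)%2 = 0), (by omega : (2*m)/2 = m)]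
  simp

theorem spreadN_zero_left (m : Nat) : spreadN 0 m = 0 := by
  induction m using Nat.strong_induction_on with
  | _ m ih =>
    rcases Nat.eq_zero_or_pos m with hm | hm
    · subst hm; exact spreadN_mask_zero 0
    rcases Nat.even_or_odd m with ⟨m', hm'⟩ | ⟨m', hm'⟩
    · obtain rfl : m = 2*m' := by omega
      rcases Nat.eq_zero_or_pos m' with h0 | h0
      · omega
      · rw [spreadN_even 0 m' (by omega), ih m' (by omega)]
    · obtain rfl : m = 2*m'+1 := by omega
      rw [spreadN_odd]
      rw [show (0:Nat)/2 = 0 by omega, ih m' (by omega)]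

-- spread stays below the mask, strictly when the counter is not yet full
theorem spreadN_le (m : Nat) : ∀ n, spreadN n m ≤ m ∧ (n + 1 < 2^(popN m) → spreadN n m < m) := by
  induction m using Nat.strong_induction_on with
  | _ m ih =>
    intro n
    rcases Nat.eq_zero_or_pos m with hm | hm
    · subst hm; rw [spreadN_mask_zero, popN_zero]; omega
    rcases Nat.even_or_odd m with ⟨m', hm'⟩ | ⟨m', hm'⟩
    · have hm0 : m' ≠ 0 := by omega
      obtain rfl : m = 2*m' := by omega
      rw [spreadN_even n m' hm0, popN_even m' hm0]
      have := ih m' (by omega) n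
      omega
    · obtain rfl : m = 2*m'+1 := by omega
      rw [spreadN_odd, popN_odd]
      have h1 := ih m' (by omega) (n/2)
      have h2 : n % 2 ≤ 1 := by omega
      constructor
      · omega
      · intro hn
        have : n/2 + 1 < 2 ^ popN m' ∨ n % 2 = 0 ∨ (n/2) + 1 = 2^(popN m') := by
          rw [pow_succ] at hn; omega
        rcases this with h | h | h
        · have := h1.2 h; omega
        · omega
        · rcases h2.lt_or_eq with h2' | h2'
          · omega
          · rw [pow_succ] at hn; omega

-- the complement of a spread value inside the mask is itself a submask of the mask
theorem land_sub_spread (m : Nat) : ∀ n, n < 2^(popN m) → m &&& (m - spreadN n m) = m - spreadN n m := by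
  induction m using Nat.strong_induction_on with
  | _ m ih =>
    intro n hn
    rcases Nat.eq_zero_or_pos m with hm | hm
    · subst hm; simp
    rcases Nat.even_or_odd m with ⟨m', hm'⟩ | ⟨m', hm'⟩
    · have hm0 : m' ≠ 0 := by omega
      obtain rfl : m = 2*m' := by omega
      rw [spreadN_even n m' hm0]
      have hs := (spreadN_le m' n).1
      rw [show 2*m' - 2*spreadN n m' = 2*(m' - spreadN n m') + 0 by omega,
          show (2*m' : Nat) = 2*m' + 0 by omega,
          land_parity 0 0 (by omega) (by omega)]
      rw [popN_even m' hm0] at hn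
      have := ih m' (by omega) n hn
      omega
    · obtain rfl : m = 2*m'+1 := by omega
      rw [spreadN_odd, popN_odd] at *
      have hs := (spreadN_le m' (n/2)).1
      have hn2 : n / 2 < 2 ^ popN m' := by
        have : n < 2 * 2^(popN m') := by rw [pow_succ] at hn; omega
        omega
      have hC := ih m' (by omega) (n/2) hn2
      rcases (by omega : n % 2 = 0 ∨ n % 2 = 1) with h2 | h2
      · rw [h2]
        rw [show 2*m'+1 - (0 + 2*spreadN (n/2) m') = 2*(m' - spreadN (n/2) m') + 1 by omega,
            land_parity 1 1 (by omega) (by omega)]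
        omega
      · rw [h2]
        rw [show 2*m'+1 - (1 + 2*spreadN (n/2) m') = 2*(m' - spreadN (n/2) m') + 0 by omega,
            land_parity 1 0 (by omega) (by omega)]
        omega

-- masked-counter increment, Nat core: m - (m &&& (m - s - 1)) steps the spread counter
theorem spread_incr_nat (m : Nat) : ∀ n, n + 1 < 2^(popN m) →
    m - (m &&& (m - spreadN n m - 1)) = spreadN (n+1) m := by
  induction m using Nat.strong_induction_on with
  | _ m ih =>
    intro n hn
    rcases Nat.eq_zero_or_pos m with hm | hm
    · subst hm; rw [popN_zero] at hn; omega
    rcases Nat.even_or_odd m with ⟨m', hm'⟩ | ⟨m', hm'⟩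
    · have hm0 : m' ≠ 0 := by omega
      obtain rfl : m = 2*m' := by omega
      rw [popN_even m' hm0] at hn
      rw [spreadN_even n m' hm0, spreadN_even (n+1) m' hm0]
      have hlt := (spreadN_le m' n).2 hn
      rw [show 2*m' - 2*spreadN n m' - 1 = 2*(m' - spreadN n m' - 1) + 1 by omega,
          show (2*m' : Nat) = 2*m' + 0 by omega,
          land_parity 0 1 (by omega) (by omega)]
      have hland : m' &&& (m' - spreadN n m' - 1) ≤ m' := Nat.and_le_left
      have := ih m' (by omega) n hn
      omega
    · obtain rfl : m = 2*m'+1 := by omega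
      rw [popN_odd] at hn
      rw [spreadN_odd n m', spreadN_odd (n+1) m']
      have hs := (spreadN_le m' (n/2)).1
      rcases (by omega : n % 2 = 0 ∨ n % 2 = 1) with h2 | h2
      · have hn2 : n / 2 < 2 ^ popN m' := by
          have : n < 2 * 2^(popN m') := by rw [pow_succ] at hn; omega
          omega
        rw [h2, show (n+1) % 2 = 1 by omega, show (n+1)/2 = n/2 by omega]
        rw [show 2*m'+1 - (0 + 2*spreadN (n/2) m') - 1 = 2*(m' - spreadN (n/2) m') + 0 by omega,
            land_parity 1 0 (by omega) (by omega)]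
        have hC := land_sub_spread m' (n/2) hn2
        omega
      · obtain ⟨k, hk⟩ : ∃ k, n = 2*k+1 := ⟨n/2, by omega⟩
        subst hk
        have hk1 : k + 1 < 2 ^ popN m' := by rw [pow_succ] at hn; omega
        have hlt := (spreadN_le m' k).2 hk1
        rw [show (2*k+1)/2 = k by omega] at *
        rw [show (2*k+1+1) % 2 = 0 by omega, show (2*k+1+1)/2 = k+1 by omega, h2]
        rw [show 2*m'+1 - (1 + 2*spreadN k m') - 1 = 2*(m' - spreadN k m' - 1) + 1 by omega,
            land_parity 1 1 (by omega) (by omega)]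
        have hland : m' &&& (m' - spreadN k m' - 1) ≤ m' := Nat.and_le_left
        have := ih m' (by omega) k hk1
        omega

theorem spread_incr_int (m n : Nat) (hn : n + 1 < 2^(popN m)) :
    PySem.Int.band ((spreadN n m : Int) - (m : Int)) (m : Int) = ((spreadN (n+1) m : Nat) : Int) := by
  have hlt : spreadN n m < m := (spreadN_le m n).2 hn
  rw [PySem.Int.band]
  rw [if_neg (by push_cast; omega), if_pos (by positivity)]
  have h1 : (-((spreadN n m : Int) - m) - 1).toNat = m - spreadN n m - 1 := by omega
  have h2 : ((m : Int)).toNat = m := by omega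
  rw [h1, h2, spread_incr_nat m n hn]


theorem land_two_pow_eq (j : Nat) : ∀ a : Nat, a &&& 2^j = ((a / 2^j) % 2) * 2^j := by
  induction j with
  | zero => intro a; simpa using Nat.and_one_is_mod a
  | succ j ih =>
    intro a
    have h1 : a = 2*(a/2) + a % 2 := by omega
    have h2 : (2:Nat)^(j+1) = 2*2^j + 0 := by ring
    calc a &&& 2^(j+1) = (2*(a/2) + a%2) &&& (2*2^j + 0) := by rw [← h1, ← h2]
    _ = 2*((a/2) &&& 2^j) + (a%2)*0 := land_parity _ _ (by omega) (by omega) _ _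
    _ = 2*(((a/2/2^j) % 2) * 2^j) := by rw [ih]; ring
    _ = ((a / 2^(j+1)) % 2) * 2^(j+1) := by
        rw [Nat.div_div_eq_div_mul, ← pow_succ', pow_succ]
        ring

theorem popN_add_pow (k : Nat) : ∀ a : Nat, a < 2^k → popN (a + 2^k) = popN a + 1 := by
  induction k with
  | zero => intro a h; interval_cases a; rw [show (0:Nat)+2^0 = 2*0+1 by norm_num, popN_odd, popN_zero]
  | succ k ih =>
    intro a h
    rcases (by omega : a % 2 = 0 ∨ a % 2 = 1) with h2 | h2
    · rw [show a + 2^(k+1) = 2*(a/2 + 2^k) by rw [pow_succ]; omega]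
      rcases Nat.eq_zero_or_pos a with ha | ha
      · subst ha
        rw [popN_zero, popN_even _ (by positivity), ih 0 (by positivity), popN_zero]
      · rw [popN_even _ (by positivity), ih (a/2) (by rw [pow_succ] at h; omega),
            ← popN_even (a/2) (by omega), show 2*(a/2) = a by omega]
    · rw [show a + 2^(k+1) = 2*(a/2 + 2^k)+1 by rw [pow_succ] at *; omega]
      rw [popN_odd, ih (a/2) (by rw [pow_succ] at h; omega),
          ← popN_odd, show 2*(a/2)+1 = a by omega]

theorem cast_shift_one (a : Nat) : ((a:Int) <<< (1:Nat)) = ((2*a : Nat) : Int) := by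
  exact Int.mem_toNat?.mp rfl

-- A's swizzle_axis loop computes the spread (bit-deposit) of val over mask
theorem axLoop_spread (fuel : Nat) : ∀ (j : Nat) (v m r : Nat), m < 2^(j+fuel) → r < 2^j →
    axLoop fuel ((2^j : Nat) : Int) (v : Int) (r : Int) (m : Int)
      = ((r + 2^j * spreadN (v / 2^j) (m / 2^j) : Nat) : Int) := by
  induction fuel with
  | zero =>
    intro j v m r hm hr
    have h0 : m / 2^j = 0 := Nat.div_eq_of_lt (by simpa using hm)
    rw [axLoop, h0, spreadN_mask_zero]
    simp
  | succ f ih =>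
    intro j v m r hm hr
    rw [axLoop]
    by_cases hbm : ((2^j:Nat) : Int) ≤ (m:Int)
    · have hbm' : 2^j ≤ m := by exact_mod_cast hbm
      rw [if_pos hbm]
      have hmj1 : 1 ≤ m / 2^j := (Nat.one_le_div_iff (by positivity)).mpr hbm'
      have htest : PySem.Int.band (m:Int) ((2^j:Nat):Int) = (((m / 2^j) % 2) * 2^j : Nat) := by
        rw [PySem.Int.band_natCast, land_two_pow_eq]
      rcases (by omega : (m / 2^j) % 2 = 1 ∨ (m / 2^j) % 2 = 0) with hpar | hpar
      · rw [if_pos (by rw [htest, hpar]; positivity)]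
        have hv : PySem.Int.band (v:Int) ((2^j:Nat):Int) = (((v / 2^j) % 2) * 2^j : Nat) := by
          rw [PySem.Int.band_natCast, land_two_pow_eq]
        have hres : PySem.Int.bor (r:Int) ((((v / 2^j) % 2) * 2^j : Nat) : Int)
            = ((r + 2^j * ((v / 2^j) % 2) : Nat) : Int) := by
          rw [PySem.Int.bor_natCast]
          congr 1
          rw [show ((v / 2^j) % 2) * 2^j = 2^j * ((v / 2^j) % 2) by ring]
          exact lor_pow_eq_add j r _ hr
        have hr' : r + 2^j * ((v / 2^j) % 2) < 2^(j+1) := by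
          have : (v / 2^j) % 2 ≤ 1 := by omega
          rw [pow_succ]
          nlinarith
        have hm' : m < 2^(j+1+f) := by rw [show j+1+f = j+(f+1) by omega]; exact hm
        rw [hv, hres, cast_shift_one, show 2*2^j = 2^(j+1) by ring]
        rw [ih (j+1) v m (r + 2^j * ((v / 2^j) % 2)) hm' hr']
        congr 1
        have hodd : m / 2^j = 2*(m / 2^(j+1)) + 1 := by
          rw [pow_succ, ← Nat.div_div_eq_div_mul]; omega
        rw [hodd, spreadN_odd]
        have hvd : v / 2^j / 2 = v / 2^(j+1) := by rw [Nat.div_div_eq_div_mul, ← pow_succ]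
        rw [hvd]
        ring
      · rw [if_neg (by rw [htest, hpar]; simp)]
        rw [cast_shift_one v, cast_shift_one, show 2*2^j = 2^(j+1) by ring]
        rw [ih (j+1) (2*v) m r (by rw [show j+1+f = j+(f+1) by omega]; exact hm)
              (by rw [pow_succ]; omega)]
        congr 1
        have heven : m / 2^j = 2*(m / 2^(j+1)) := by
          rw [pow_succ, ← Nat.div_div_eq_div_mul]; omega
        have hne : m / 2^(j+1) ≠ 0 := by omega
        rw [heven, spreadN_even _ _ hne]
        have hvd : 2*v / 2^(j+1) = v / 2^j := by
          rw [pow_succ', Nat.mul_div_mul_left _ _ (by norm_num)]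
        rw [hvd]
        ring
    · rw [if_neg hbm]
      have : m < 2^j := by
        have := lt_of_not_ge (fun hg => hbm (by exact_mod_cast hg))
        exact_mod_cast this
      have h0 : m / 2^j = 0 := Nat.div_eq_of_lt this
      rw [h0, spreadN_mask_zero]
      simp

theorem swizzleAxis_spread (v m : Nat) (hm : m < 2^256) :
    swizzleAxis (v:Int) (m:Int) = ((spreadN v m : Nat) : Int) := by
  rw [swizzleAxis, show (1:Int) = ((2^0 : Nat) : Int) by norm_num, show (0:Int) = ((0:Nat):Int) by norm_num]
  rw [axLoop_spread 256 0 v m 0 (by simpa using hm) (by norm_num)]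
  simp

theorem lor_pow_one {a k : Nat} (h : a < 2^k) : a ||| 2^k = a + 2^k := by
  simpa using lor_pow_eq_add k a 1 h

theorem lt_pow_mono {k k' : Nat} (h : k ≤ k') {a : Nat} (ha : a < 2^k) : a < 2^k' :=
  lt_of_lt_of_le ha (Nat.pow_le_pow_right (by norm_num) h)

theorem min_step_taken {i w p : Nat} (hc : 2^i < w) (hmin : min (2^i) w ≤ 2^p) :
    min (2^(i+1)) w ≤ 2^(p+1) := by
  rw [min_eq_left (le_of_lt hc)] at hmin
  have h1 : min (2^(i+1)) w ≤ 2^(i+1) := min_le_left _ _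
  rw [pow_succ] at *
  omega

theorem min_step_skipped {i w p : Nat} (hc : ¬(2^i < w)) (hmin : min (2^i) w ≤ 2^p) :
    min (2^(i+1)) w ≤ 2^p := by
  have hw : w ≤ 2^i := by omega
  rw [min_eq_right hw] at hmin
  rw [min_eq_right (le_trans hw (Nat.pow_le_pow_right (by norm_num) (by omega)))]
  exact hmin

-- MaskSet grows each mask by fresh high bits; each dimension fits in 2^popcount of its mask
theorem maskLoop_inv (fuel : Nat) : ∀ (i k mxn myn mzn : Nat) (w h d : Int),
    w.toNat ≤ 2^(i+fuel) → h.toNat ≤ 2^(i+fuel) → d.toNat ≤ 2^(i+fuel) →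
    mxn < 2^k → myn < 2^k → mzn < 2^k →
    min (2^i) w.toNat ≤ 2^(popN mxn) → min (2^i) h.toNat ≤ 2^(popN myn) →
    ∃ (mxn' myn' mzn' : Nat),
      maskLoop fuel ((2^i:Nat):Int) ((2^k:Nat):Int) (mxn:Int) (myn:Int) (mzn:Int) w h d
          = ((mxn':Int), (myn':Int), (mzn':Int)) ∧
      mxn' < 2^(k+3*fuel) ∧ myn' < 2^(k+3*fuel) ∧
      w.toNat ≤ 2^(popN mxn') ∧ h.toNat ≤ 2^(popN myn') := by
  induction fuel with
  | zero =>
    intro i k mxn myn mzn w h d hw hh hd hx hy hz hminx hminy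
    refine ⟨mxn, myn, mzn, by rw [maskLoop], by simpa using hx, by simpa using hy, ?_, ?_⟩
    · rw [min_eq_right (by simpa using hw)] at hminx; exact hminx
    · rw [min_eq_right (by simpa using hh)] at hminy; exact hminy
  | succ f ih =>
    intro i k mxn myn mzn w h d hw hh hd hx hy hz hminx hminy
    have g : ∀ (u : Int), (((2^i:Nat):Int) < u) ↔ 2^i < u.toNat := by
      intro u
      generalize 2^i = a
      omega
    rw [maskLoop]
    by_cases hc : ((2^i:Nat):Int) < w ∨ ((2^i:Nat):Int) < h ∨ ((2^i:Nat):Int) < d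
    · rw [if_pos hc]
      by_cases c1 : ((2^i:Nat):Int) < w <;> by_cases c2 : ((2^i:Nat):Int) < h <;>
        by_cases c3 : ((2^i:Nat):Int) < d <;>
        simp only [c1, c2, c3, if_true, if_false, ite_true, ite_false,
          PySem.Int.bor_natCast, cast_shift_one]
      · have hx1 : mxn ||| 2^k = mxn + 2^k := lor_pow_one hx
        have hy1 : myn ||| 2*(2^k) = myn + 2^(k+1) := by rw [show (2*(2^k):Nat) = 2^(k+1) by ring]; exact lor_pow_one (lt_pow_mono (by omega) hy)
        have hz1 : mzn ||| 2*(2*(2^k)) = mzn + 2^(k+2) := by rw [show (2*(2*(2^k)):Nat) = 2^(k+2) by ring]; exact lor_pow_one (lt_pow_mono (by omega) hz)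
        rw [hx1, hy1, hz1, show (2*(2*(2*(2^k))):Nat) = 2^(k+3) by ring, show (2*2^i:Nat) = 2^(i+1) by ring]
        obtain ⟨mx',my',mz',heq,q1,q2,p1,p2⟩ := ih (i+1) (k+3) (mxn+2^k) (myn+2^(k+1)) (mzn+2^(k+2)) w h d
          (by rw [show i+1+f = i+(f+1) by omega]; exact hw) (by rw [show i+1+f = i+(f+1) by omega]; exact hh) (by rw [show i+1+f = i+(f+1) by omega]; exact hd)
          (by have hbig : mxn < 2^(k) := lt_pow_mono (by omega) hx
              have h2p : mxn + 2^(k) < 2^(k+1) := by rw [pow_succ 2 (k)]; omega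
              exact lt_pow_mono (by omega) h2p)
          (by have hbig : myn < 2^(k+1) := lt_pow_mono (by omega) hy
              have h2p : myn + 2^(k+1) < 2^(k+1+1) := by rw [pow_succ 2 (k+1)]; omega
              exact lt_pow_mono (by omega) h2p)
          (by have hbig : mzn < 2^(k+2) := lt_pow_mono (by omega) hz
              have h2p : mzn + 2^(k+2) < 2^(k+2+1) := by rw [pow_succ 2 (k+2)]; omega
              exact lt_pow_mono (by omega) h2p)
          (by rw [popN_add_pow k mxn hx]; exact min_step_taken ((g w).mp c1) hminx)
          (by rw [popN_add_pow (k+1) myn (lt_pow_mono (by omega) hy)]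
              exact min_step_taken ((g h).mp c2) hminy)
        exact ⟨mx',my',mz',heq, lt_pow_mono (by omega) q1, lt_pow_mono (by omega) q2, p1, p2⟩
      · have hx1 : mxn ||| 2^k = mxn + 2^k := lor_pow_one hx
        have hy1 : myn ||| 2*(2^k) = myn + 2^(k+1) := by rw [show (2*(2^k):Nat) = 2^(k+1) by ring]; exact lor_pow_one (lt_pow_mono (by omega) hy)
        rw [hx1, hy1, show (2*(2*(2^k)):Nat) = 2^(k+2) by ring, show (2*2^i:Nat) = 2^(i+1) by ring]
        obtain ⟨mx',my',mz',heq,q1,q2,p1,p2⟩ := ih (i+1) (k+2) (mxn+2^k) (myn+2^(k+1)) mzn w h d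
          (by rw [show i+1+f = i+(f+1) by omega]; exact hw) (by rw [show i+1+f = i+(f+1) by omega]; exact hh) (by rw [show i+1+f = i+(f+1) by omega]; exact hd)
          (by have hbig : mxn < 2^(k) := lt_pow_mono (by omega) hx
              have h2p : mxn + 2^(k) < 2^(k+1) := by rw [pow_succ 2 (k)]; omega
              exact lt_pow_mono (by omega) h2p)
          (by have hbig : myn < 2^(k+1) := lt_pow_mono (by omega) hy
              have h2p : myn + 2^(k+1) < 2^(k+1+1) := by rw [pow_succ 2 (k+1)]; omega
              exact lt_pow_mono (by omega) h2p)
          (lt_pow_mono (by omega) hz)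
          (by rw [popN_add_pow k mxn hx]; exact min_step_taken ((g w).mp c1) hminx)
          (by rw [popN_add_pow (k+1) myn (lt_pow_mono (by omega) hy)]
              exact min_step_taken ((g h).mp c2) hminy)
        exact ⟨mx',my',mz',heq, lt_pow_mono (by omega) q1, lt_pow_mono (by omega) q2, p1, p2⟩
      · have hx1 : mxn ||| 2^k = mxn + 2^k := lor_pow_one hx
        have hz1 : mzn ||| 2*(2^k) = mzn + 2^(k+1) := by rw [show (2*(2^k):Nat) = 2^(k+1) by ring]; exact lor_pow_one (lt_pow_mono (by omega) hz)
        rw [hx1, hz1, show (2*(2*(2^k)):Nat) = 2^(k+2) by ring, show (2*2^i:Nat) = 2^(i+1) by ring]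
        obtain ⟨mx',my',mz',heq,q1,q2,p1,p2⟩ := ih (i+1) (k+2) (mxn+2^k) myn (mzn+2^(k+1)) w h d
          (by rw [show i+1+f = i+(f+1) by omega]; exact hw) (by rw [show i+1+f = i+(f+1) by omega]; exact hh) (by rw [show i+1+f = i+(f+1) by omega]; exact hd)
          (by have hbig : mxn < 2^(k) := lt_pow_mono (by omega) hx
              have h2p : mxn + 2^(k) < 2^(k+1) := by rw [pow_succ 2 (k)]; omega
              exact lt_pow_mono (by omega) h2p)
          (lt_pow_mono (by omega) hy)
          (by have hbig : mzn < 2^(k+1) := lt_pow_mono (by omega) hz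
              have h2p : mzn + 2^(k+1) < 2^(k+1+1) := by rw [pow_succ 2 (k+1)]; omega
              exact lt_pow_mono (by omega) h2p)
          (by rw [popN_add_pow k mxn hx]; exact min_step_taken ((g w).mp c1) hminx)
          (min_step_skipped (fun hlt => c2 ((g h).mpr hlt)) hminy)
        exact ⟨mx',my',mz',heq, lt_pow_mono (by omega) q1, lt_pow_mono (by omega) q2, p1, p2⟩
      · have hx1 : mxn ||| 2^k = mxn + 2^k := lor_pow_one hx
        rw [hx1, show (2*(2^k):Nat) = 2^(k+1) by ring, show (2*2^i:Nat) = 2^(i+1) by ring]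
        obtain ⟨mx',my',mz',heq,q1,q2,p1,p2⟩ := ih (i+1) (k+1) (mxn+2^k) myn mzn w h d
          (by rw [show i+1+f = i+(f+1) by omega]; exact hw) (by rw [show i+1+f = i+(f+1) by omega]; exact hh) (by rw [show i+1+f = i+(f+1) by omega]; exact hd)
          (by have hbig : mxn < 2^(k) := lt_pow_mono (by omega) hx
              have h2p : mxn + 2^(k) < 2^(k+1) := by rw [pow_succ 2 (k)]; omega
              exact lt_pow_mono (by omega) h2p)
          (lt_pow_mono (by omega) hy)
          (lt_pow_mono (by omega) hz)
          (by rw [popN_add_pow k mxn hx]; exact min_step_taken ((g w).mp c1) hminx)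
          (min_step_skipped (fun hlt => c2 ((g h).mpr hlt)) hminy)
        exact ⟨mx',my',mz',heq, lt_pow_mono (by omega) q1, lt_pow_mono (by omega) q2, p1, p2⟩
      · have hy1 : myn ||| 2^k = myn + 2^(k) := by rw [show (2^k:Nat) = 2^(k) by ring]; exact lor_pow_one (lt_pow_mono (by omega) hy)
        have hz1 : mzn ||| 2*(2^k) = mzn + 2^(k+1) := by rw [show (2*(2^k):Nat) = 2^(k+1) by ring]; exact lor_pow_one (lt_pow_mono (by omega) hz)
        rw [hy1, hz1, show (2*(2*(2^k)):Nat) = 2^(k+2) by ring, show (2*2^i:Nat) = 2^(i+1) by ring]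
        obtain ⟨mx',my',mz',heq,q1,q2,p1,p2⟩ := ih (i+1) (k+2) mxn (myn+2^(k)) (mzn+2^(k+1)) w h d
          (by rw [show i+1+f = i+(f+1) by omega]; exact hw) (by rw [show i+1+f = i+(f+1) by omega]; exact hh) (by rw [show i+1+f = i+(f+1) by omega]; exact hd)
          (lt_pow_mono (by omega) hx)
          (by have hbig : myn < 2^(k) := lt_pow_mono (by omega) hy
              have h2p : myn + 2^(k) < 2^(k+1) := by rw [pow_succ 2 (k)]; omega
              exact lt_pow_mono (by omega) h2p)
          (by have hbig : mzn < 2^(k+1) := lt_pow_mono (by omega) hz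
              have h2p : mzn + 2^(k+1) < 2^(k+1+1) := by rw [pow_succ 2 (k+1)]; omega
              exact lt_pow_mono (by omega) h2p)
          (min_step_skipped (fun hlt => c1 ((g w).mpr hlt)) hminx)
          (by rw [popN_add_pow (k) myn (lt_pow_mono (by omega) hy)]
              exact min_step_taken ((g h).mp c2) hminy)
        exact ⟨mx',my',mz',heq, lt_pow_mono (by omega) q1, lt_pow_mono (by omega) q2, p1, p2⟩
      · have hy1 : myn ||| 2^k = myn + 2^(k) := by rw [show (2^k:Nat) = 2^(k) by ring]; exact lor_pow_one (lt_pow_mono (by omega) hy)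
        rw [hy1, show (2*(2^k):Nat) = 2^(k+1) by ring, show (2*2^i:Nat) = 2^(i+1) by ring]
        obtain ⟨mx',my',mz',heq,q1,q2,p1,p2⟩ := ih (i+1) (k+1) mxn (myn+2^(k)) mzn w h d
          (by rw [show i+1+f = i+(f+1) by omega]; exact hw) (by rw [show i+1+f = i+(f+1) by omega]; exact hh) (by rw [show i+1+f = i+(f+1) by omega]; exact hd)
          (lt_pow_mono (by omega) hx)
          (by have hbig : myn < 2^(k) := lt_pow_mono (by omega) hy
              have h2p : myn + 2^(k) < 2^(k+1) := by rw [pow_succ 2 (k)]; omega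
              exact lt_pow_mono (by omega) h2p)
          (lt_pow_mono (by omega) hz)
          (min_step_skipped (fun hlt => c1 ((g w).mpr hlt)) hminx)
          (by rw [popN_add_pow (k) myn (lt_pow_mono (by omega) hy)]
              exact min_step_taken ((g h).mp c2) hminy)
        exact ⟨mx',my',mz',heq, lt_pow_mono (by omega) q1, lt_pow_mono (by omega) q2, p1, p2⟩
      · have hz1 : mzn ||| 2^k = mzn + 2^(k) := by rw [show (2^k:Nat) = 2^(k) by ring]; exact lor_pow_one (lt_pow_mono (by omega) hz)
        rw [hz1, show (2*(2^k):Nat) = 2^(k+1) by ring, show (2*2^i:Nat) = 2^(i+1) by ring]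
        obtain ⟨mx',my',mz',heq,q1,q2,p1,p2⟩ := ih (i+1) (k+1) mxn myn (mzn+2^(k)) w h d
          (by rw [show i+1+f = i+(f+1) by omega]; exact hw) (by rw [show i+1+f = i+(f+1) by omega]; exact hh) (by rw [show i+1+f = i+(f+1) by omega]; exact hd)
          (lt_pow_mono (by omega) hx)
          (lt_pow_mono (by omega) hy)
          (by have hbig : mzn < 2^(k) := lt_pow_mono (by omega) hz
              have h2p : mzn + 2^(k) < 2^(k+1) := by rw [pow_succ 2 (k)]; omega
              exact lt_pow_mono (by omega) h2p)
          (min_step_skipped (fun hlt => c1 ((g w).mpr hlt)) hminx)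
          (min_step_skipped (fun hlt => c2 ((g h).mpr hlt)) hminy)
        exact ⟨mx',my',mz',heq, lt_pow_mono (by omega) q1, lt_pow_mono (by omega) q2, p1, p2⟩
      · rw [show (2^k:Nat) = 2^(k+0) by ring, show (2*2^i:Nat) = 2^(i+1) by ring]
        obtain ⟨mx',my',mz',heq,q1,q2,p1,p2⟩ := ih (i+1) (k+0) mxn myn mzn w h d
          (by rw [show i+1+f = i+(f+1) by omega]; exact hw) (by rw [show i+1+f = i+(f+1) by omega]; exact hh) (by rw [show i+1+f = i+(f+1) by omega]; exact hd)
          (lt_pow_mono (by omega) hx)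
          (lt_pow_mono (by omega) hy)
          (lt_pow_mono (by omega) hz)
          (min_step_skipped (fun hlt => c1 ((g w).mpr hlt)) hminx)
          (min_step_skipped (fun hlt => c2 ((g h).mpr hlt)) hminy)
        exact ⟨mx',my',mz',heq, lt_pow_mono (by omega) q1, lt_pow_mono (by omega) q2, p1, p2⟩
    · rw [if_neg hc]
      push_neg at hc
      obtain ⟨c1, c2, c3⟩ := hc
      refine ⟨mxn, myn, mzn, rfl, ?_, ?_, ?_, ?_⟩
      · exact lt_pow_mono (by omega) hx
      · exact lt_pow_mono (by omega) hy
      · rw [min_eq_right (by have := (g w).not.mp (not_lt.mpr c1); omega)] at hminx; exact hminx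
      · rw [min_eq_right (by have := (g h).not.mp (not_lt.mpr c2); omega)] at hminy; exact hminy

theorem masksAltLoop_eq (fuel : Nat) : ∀ (bit index mx my mz width height depth : Int),
    masksAltLoop fuel bit index mx my width height depth
      = ((maskLoop fuel bit index mx my mz width height depth).1,
         (maskLoop fuel bit index mx my mz width height depth).2.1) := by
  induction fuel with
  | zero => intro bit index mx my mz w h d; rfl
  | succ f ih =>
    intro bit index mx my mz w h d
    rw [masksAltLoop, maskLoop]
    by_cases hc : bit < w ∨ bit < h ∨ bit < d
    · rw [if_pos hc, if_pos hc]
      by_cases c1 : bit < w <;> by_cases c2 : bit < h <;> by_cases c3 : bit < d <;>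
        simp only [c1, c2, c3, if_true, if_false, ite_true, ite_false] <;>
        exact ih _ _ _ _ _ _ _ _
    · rw [if_neg hc, if_neg hc]

def rangeI (n : Nat) : List Int := (List.range n).map (fun k : Nat => (k : Int))

theorem rangeI_succ (n : Nat) : rangeI (n+1) = rangeI n ++ [(n:Int)] := by
  simp [rangeI, List.range_succ]

theorem pyRange_zero_eq (H : Int) : PySem.List.pyRange 0 H 1 = rangeI H.toNat := by
  rw [PySem.List.pyRange_one, rangeI]
  simp only [Int.sub_zero, zero_add]

-- B's inner loop over one row equals A's, with the a/sx counters tracked explicitly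
theorem inner_eq (F : List Int → Int → Int → List Int) (bc syI : Int) (mxn wN : Nat)
    (hwx : wN ≤ 2 ^ popN mxn) :
    ∀ (n : Nat), n ≤ wN → ∀ (out : List Int) (a0 : Int),
    ∃ s : Int,
      (rangeI n).foldl (fun (t : List Int × Int × Int) _x =>
          (F t.1 t.2.1 (PySem.Int.bor t.2.2 syI), t.2.1 + bc,
           PySem.Int.band (t.2.2 - (mxn:Int)) (mxn:Int))) (out, a0, 0)
        = ((rangeI n).foldl
            (fun o x => F o (a0 + x * bc) (PySem.Int.bor ((spreadN x.toNat mxn : Nat) : Int) syI)) out,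
           a0 + (n:Int) * bc, s)
      ∧ (n < wN → s = ((spreadN n mxn : Nat) : Int)) := by
  intro n
  induction n with
  | zero =>
    intro _ out a0
    refine ⟨0, by simp [rangeI], fun _ => ?_⟩
    rw [spreadN_zero_left]
    simp
  | succ n ih =>
    intro hn out a0
    obtain ⟨s, heq, hs⟩ := ih (by omega) out a0
    have hsv := hs (by omega)
    refine ⟨PySem.Int.band (s - (mxn:Int)) (mxn:Int), ?_, ?_⟩
    · rw [rangeI_succ, List.foldl_append, List.foldl_append, heq, hsv]
      simp only [List.foldl_cons, List.foldl_nil, Int.toNat_natCast]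
      have har : a0 + (n:Int) * bc + bc = a0 + ((n+1 : Nat) : Int) * bc := by push_cast; ring
      rw [har]
    · intro hlt
      rw [hsv]
      have : n + 1 < 2 ^ popN mxn := by omega
      exact spread_incr_int mxn n this

-- B's outer loop equals A's, with the global a counter and the sy counter tracked
theorem outer_eq (F : List Int → Int → Int → List Int) (bc width : Int) (mxn myn wN hN : Nat)
    (hwidth : wN = width.toNat)
    (hwx : wN ≤ 2 ^ popN mxn) (hhy : hN ≤ 2 ^ popN myn) :
    ∀ (m : Nat), m ≤ hN → ∀ (out : List Int),
    ∃ (a' s : Int),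
      (rangeI m).foldl (fun (S : List Int × Int × Int) _y =>
          ((rangeI wN).foldl (fun (t : List Int × Int × Int) _x =>
              (F t.1 t.2.1 (PySem.Int.bor t.2.2 S.2.2), t.2.1 + bc,
               PySem.Int.band (t.2.2 - (mxn:Int)) (mxn:Int))) (S.1, S.2.1, 0) |>.1,
           (rangeI wN).foldl (fun (t : List Int × Int × Int) _x =>
              (F t.1 t.2.1 (PySem.Int.bor t.2.2 S.2.2), t.2.1 + bc,
               PySem.Int.band (t.2.2 - (mxn:Int)) (mxn:Int))) (S.1, S.2.1, 0) |>.2.1,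
           PySem.Int.band (S.2.2 - (myn:Int)) (myn:Int))) (out, 0, 0)
        = ((rangeI m).foldl (fun o y =>
             (rangeI wN).foldl (fun o x =>
               F o (y * width * bc + x * bc)
                 (PySem.Int.bor ((spreadN x.toNat mxn : Nat) : Int)
                   ((spreadN y.toNat myn : Nat) : Int))) o) out,
           a', s)
      ∧ a' = ((m * wN : Nat) : Int) * bc
      ∧ (m < hN → s = ((spreadN m myn : Nat) : Int)) := by
  intro m
  induction m with
  | zero =>
    intro _ out
    refine ⟨0, 0, by simp [rangeI], by simp, fun _ => ?_⟩
    rw [spreadN_zero_left]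
    simp
  | succ m ih =>
    intro hm out
    obtain ⟨a', s, heq, ha, hs⟩ := ih (by omega) out
    have hsv := hs (by omega)
    obtain ⟨s2, hrow, _⟩ := inner_eq F bc ((spreadN m myn : Nat) : Int) mxn wN hwx wN (le_refl _)
      ((rangeI m).foldl (fun o y =>
             (rangeI wN).foldl (fun o x =>
               F o (y * width * bc + x * bc)
                 (PySem.Int.bor ((spreadN x.toNat mxn : Nat) : Int)
                   ((spreadN y.toNat myn : Nat) : Int))) o) out) a'
    have hAB : ∀ o : List Int,
        (rangeI wN).foldl (fun o x => F o (a' + x * bc)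
            (PySem.Int.bor ((spreadN x.toNat mxn : Nat) : Int) ((spreadN m myn : Nat) : Int))) o
          = (rangeI wN).foldl (fun o x => F o ((m:Int) * width * bc + x * bc)
            (PySem.Int.bor ((spreadN x.toNat mxn : Nat) : Int) ((spreadN m myn : Nat) : Int))) o := by
      intro o
      apply PySem.List.foldl_congr_mem
      intro acc x hx
      have hwpos : wN ≠ 0 := by
        intro h0
        rw [h0] at hx
        simp [rangeI] at hx
      have hww : width = (wN:Int) := by omega
      congr 2
      rw [ha, hww]
      push_cast
      ring
    refine ⟨a' + (wN:Int) * bc, PySem.Int.band (s - (myn:Int)) (myn:Int), ?_, ?_, ?_⟩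
    · rw [rangeI_succ, List.foldl_append, List.foldl_append, heq]
      simp only [List.foldl_cons, List.foldl_nil, Int.toNat_natCast]
      rw [hsv, hrow, hAB]
    · rw [ha]; push_cast; ring
    · intro hlt
      rw [hsv]
      exact spread_incr_int myn m (by omega)

-- ===== VERDICT (by name: the statement is the Claim_ definition above) =====
theorem swizzle_spec : Claim_equal_swizzle := by
  unfold Claim_equal_swizzle
  intro data width height bitCount depth unswizzle hDom hPre
  unfold Spec_swizzle
  simp only [Dom_swizzle, Bool.and_eq_true, List.all_eq_true, pvDomInt, decide_eq_true_eq] at hDom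
  obtain ⟨⟨⟨⟨-, hw⟩, hh⟩, -⟩, hd⟩ := hDom
  obtain ⟨mxn, myn, mzn, hmask, hbx, hby, hpx, hpy⟩ :=
    maskLoop_inv 64 0 0 0 0 0 width height depth
      (by norm_num; omega) (by norm_num; omega) (by norm_num; omega)
      (by norm_num) (by norm_num) (by norm_num)
      (by rw [popN_zero]; exact le_trans (min_le_left _ _) (by norm_num))
      (by rw [popN_zero]; exact le_trans (min_le_left _ _) (by norm_num))
  norm_num at hmask
  have hmask' : maskSet width height depth = ((mxn:Int), (myn:Int), (mzn:Int)) := by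
    rw [maskSet]; exact hmask
  have halt : masksAlt width height depth = ((mxn:Int), (myn:Int)) := by
    rw [masksAlt, masksAltLoop_eq 64 1 1 0 0 0 width height depth, hmask]
  have hmx256 : mxn < 2^256 := lt_pow_mono (by norm_num) hbx
  have hmy256 : myn < 2^256 := lt_pow_mono (by norm_num) hby
  rcases unswizzle with _ | _
  all_goals simp only [swizzle, swizzle_alt, hmask', halt, pyRange_zero_eq]

  · set F : List Int → Int → Int → List Int := fun o a mor =>
        (rangeI (PySem.Int.floordiv bitCount 8).toNat).foldl
          (fun o i => PySem.List.pySetD o (mor * PySem.Int.floordiv bitCount 8 + i)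
            (PySem.List.pyGetD data (a + i) 0)) o with hF
    obtain ⟨a', s, heq, -, -⟩ := outer_eq F (PySem.Int.floordiv bitCount 8) width mxn myn
      width.toNat height.toNat rfl hpx hpy height.toNat le_rfl (List.replicate data.length 0)
    refine Eq.trans ?_ ((congrArg Prod.fst heq).symm)
    apply PySem.List.foldl_congr_mem
    intro acc y hy
    simp only [rangeI, List.mem_map] at hy
    obtain ⟨ky, -, rfl⟩ := hy
    apply PySem.List.foldl_congr_mem
    intro acc2 x hx
    simp only [rangeI, List.mem_map] at hx
    obtain ⟨kx, -, rfl⟩ := hx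
    show F acc2 (((ky:Int) * width + (kx:Int)) * PySem.Int.floordiv bitCount 8)
        (PySem.Int.bor (PySem.Int.bor (swizzleAxis (kx:Int) (mxn:Int)) (swizzleAxis (ky:Int) (myn:Int))) 0)
      = F acc2 ((ky:Int) * width * PySem.Int.floordiv bitCount 8 + (kx:Int) * PySem.Int.floordiv bitCount 8)
        (PySem.Int.bor ((spreadN ((kx:Int)).toNat mxn : Nat) : Int) ((spreadN ((ky:Int)).toNat myn : Nat) : Int))
    rw [show ((ky:Int) * width + (kx:Int)) * PySem.Int.floordiv bitCount 8
          = (ky:Int) * width * PySem.Int.floordiv bitCount 8 + (kx:Int) * PySem.Int.floordiv bitCount 8 by ring,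
        PySem.Int.bor_zero, swizzleAxis_spread kx mxn hmx256, swizzleAxis_spread ky myn hmy256,
        Int.toNat_natCast, Int.toNat_natCast]

  · set F : List Int → Int → Int → List Int := fun o a mor =>
        (rangeI (PySem.Int.floordiv bitCount 8).toNat).foldl
          (fun o i => PySem.List.pySetD o (a + i)
            (PySem.List.pyGetD data (mor * PySem.Int.floordiv bitCount 8 + i) 0)) o with hF
    obtain ⟨a', s, heq, -, -⟩ := outer_eq F (PySem.Int.floordiv bitCount 8) width mxn myn
      width.toNat height.toNat rfl hpx hpy height.toNat le_rfl (List.replicate data.length 0)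
    refine Eq.trans ?_ ((congrArg Prod.fst heq).symm)
    apply PySem.List.foldl_congr_mem
    intro acc y hy
    simp only [rangeI, List.mem_map] at hy
    obtain ⟨ky, -, rfl⟩ := hy
    apply PySem.List.foldl_congr_mem
    intro acc2 x hx
    simp only [rangeI, List.mem_map] at hx
    obtain ⟨kx, -, rfl⟩ := hx
    show F acc2 (((ky:Int) * width + (kx:Int)) * PySem.Int.floordiv bitCount 8)
        (PySem.Int.bor (PySem.Int.bor (swizzleAxis (kx:Int) (mxn:Int)) (swizzleAxis (ky:Int) (myn:Int))) 0)
      = F acc2 ((ky:Int) * width * PySem.Int.floordiv bitCount 8 + (kx:Int) * PySem.Int.floordiv bitCount 8)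
        (PySem.Int.bor ((spreadN ((kx:Int)).toNat mxn : Nat) : Int) ((spreadN ((ky:Int)).toNat myn : Nat) : Int))
    rw [show ((ky:Int) * width + (kx:Int)) * PySem.Int.floordiv bitCount 8
          = (ky:Int) * width * PySem.Int.floordiv bitCount 8 + (kx:Int) * PySem.Int.floordiv bitCount 8 by ring,
        PySem.Int.bor_zero, swizzleAxis_spread kx mxn hmx256, swizzleAxis_spread ky myn hmy256,
        Int.toNat_natCast, Int.toNat_natCast]
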